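-- pv_equiv track=rewrite | github.com/sansten/ninai | backend/app/services/event_publishing_service.py | _matches_event_filter
-- ===== SOURCE A (Python) =====
-- def _matches_event_filter(event_type: str, filter_str: str) -> bool:
--     """Check if event type matches subscription filter."""
--     if filter_str == "*":
--         return True
--
--     filters = [f.strip() for f in filter_str.split(",")]
--
--     # Support wildcards: "memory.*" matches "memory.created"
--     for f in filters:
--         if f == event_type:
--             return True
--         if f.endswith(".*"):
--             prefix = f[:-2]  # Remove .*
--             if event_type.startswith(prefix + "."):
--                 return True
--
--     return False
-- ===== SOURCE B (Python) =====
-- def _matches_event_filter(event_type: str, filter_str: str) -> bool: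
--     """Check if event type matches subscription filter."""
--     if filter_str == "*":
--         return True
--
--     filters = {f.strip() for f in filter_str.split(",")}
--
--     # Candidate keys that could match: the event type itself, and for every
--     # '.' in it the wildcard form "<prefix>.*" cut at that dot.
--     candidates = [event_type]
--     for i, ch in enumerate(event_type):
--         if ch == ".":
--             candidates.append(event_type[:i] + ".*")
--
--     return any(c in filters for c in candidates)
-- ===== Notes on version B (the rewrite author's own statement) =====
-- stated objective: alternative
-- what changed: Instead of scanning every filter and testing equality/endswith/startswith per filter, B builds the stripped filters into a set once and enumerates the event type's dotted-prefix wildcard candidates, answering by set membership.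
import Mathlib
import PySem

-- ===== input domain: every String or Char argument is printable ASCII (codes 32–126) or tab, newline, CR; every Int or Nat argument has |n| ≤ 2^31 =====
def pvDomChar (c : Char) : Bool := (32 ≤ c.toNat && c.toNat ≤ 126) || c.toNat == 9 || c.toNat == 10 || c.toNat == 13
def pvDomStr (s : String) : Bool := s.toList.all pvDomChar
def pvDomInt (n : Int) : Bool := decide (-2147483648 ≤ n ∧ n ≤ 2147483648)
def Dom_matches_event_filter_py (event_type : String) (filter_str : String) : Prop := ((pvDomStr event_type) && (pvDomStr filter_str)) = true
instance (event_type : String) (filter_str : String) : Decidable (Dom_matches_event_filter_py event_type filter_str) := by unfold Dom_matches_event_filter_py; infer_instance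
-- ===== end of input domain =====

-- B replaces A's scan-every-filter (equality / endswith / startswith per filter) by a
-- one-shot filter set plus enumeration of the event type's dotted-prefix wildcard candidates.

-- ===== PORT A =====
-- A's for-loop over the filters, same branch order as the Python
def pvLoopA (et : List Char) : List (List Char) → Bool
  | [] => false
  | f :: rest =>
    if f == et then true
    else if PySem.Chars.endswith f ['.', '*'] then
      if PySem.Chars.startswith et (PySem.List.slice f none (some (-2)) ++ ['.']) then true
      else pvLoopA et rest
    else pvLoopA et rest

def matches_event_filter_py (event_type : String) (filter_str : String) : Bool :=
  if filter_str == "*" then true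
  else
    let filters := (PySem.Chars.splitOn filter_str.toList [',']).map PySem.Chars.strip
    pvLoopA event_type.toList filters

-- ===== PORT B =====
def matches_event_filter_py_alt (event_type : String) (filter_str : String) : Bool :=
  if filter_str == "*" then true
  else
    let et := event_type.toList
    let filters : PySem.Set (List Char) :=
      PySem.Set.ofList ((PySem.Chars.splitOn filter_str.toList [',']).map PySem.Chars.strip)
    let candidates :=
      (PySem.List.enumerate et).foldl
        (fun acc p =>
          if p.2 == '.' then acc ++ [PySem.List.slice et none (some p.1) ++ ['.', '*']] else acc)
        [et]
    candidates.any (fun c => PySem.Set.contains filters c)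

-- ===== PRECONDITION & SPEC =====
def Spec_matches_event_filter_py (event_type : String) (filter_str : String) (out : Bool) : Prop := out = matches_event_filter_py_alt event_type filter_str
instance (event_type : String) (filter_str : String) (out : Bool) : Decidable (Spec_matches_event_filter_py event_type filter_str out) := by unfold Spec_matches_event_filter_py; infer_instance

-- ===== CLAIM (what is proved, stated in full; the proofs are below) =====
def Claim_equal_matches_event_filter_py : Prop := ∀ (event_type : String) (filter_str : String), Dom_matches_event_filter_py event_type filter_str → Spec_matches_event_filter_py event_type filter_str (matches_event_filter_py event_type filter_str)

-- ===== LEMMAS AND PROOFS =====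

-- the per-filter test A performs, as a predicate
def pvPredA (et f : List Char) : Bool :=
  f == et ||
    (PySem.Chars.endswith f ['.', '*'] &&
      PySem.Chars.startswith et (PySem.List.slice f none (some (-2)) ++ ['.']))

theorem pvLoopA_eq_any (et : List Char) (fs : List (List Char)) :
    pvLoopA et fs = fs.any (pvPredA et) := by
  induction fs with
  | nil => rfl
  | cons f rest ih =>
    simp only [pvLoopA, List.any_cons, pvPredA]
    split_ifs with h1 h2 h3 <;> simp_all

theorem pvPredA_iff (et f : List Char) :
    pvPredA et f = true ↔
      (f = et ∨ ∃ (k : Nat) (_ : k < et.length), et[k] = '.' ∧ f = et.take k ++ ['.', '*']) := by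
  unfold pvPredA
  rw [PySem.List.slice_to_neg_ofNat f 2 (by omega)]
  simp only [Bool.or_eq_true, Bool.and_eq_true, beq_iff_eq,
    PySem.Chars.endswith_iff, PySem.Chars.startswith_iff]
  constructor
  · rintro (rfl | ⟨⟨q, rfl⟩, hpre⟩)
    · exact Or.inl rfl
    · right
      have hq : (q ++ ['.', '*']).take ((q ++ ['.', '*']).length - 2) = q := by
        simp
      rw [hq] at hpre
      obtain ⟨r, hr⟩ := hpre
      have het : et = q ++ '.' :: r := by rw [← hr]; simp
      subst het
      refine ⟨q.length, by simp, by simp, by rw [List.take_left]⟩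
  · rintro (rfl | ⟨k, hk, hdot, rfl⟩)
    · exact Or.inl rfl
    · right
      refine ⟨⟨et.take k, rfl⟩, ?_⟩
      have hlen : (et.take k).length = k := by simp; omega
      have htake : (et.take k ++ ['.', '*']).take ((et.take k ++ ['.', '*']).length - 2)
          = et.take k := by simp
      rw [htake]
      refine ⟨et.drop (k + 1), ?_⟩
      rw [List.append_assoc]
      have : ('.' : Char) :: et.drop (k + 1) = et.drop k := by
        rw [List.drop_eq_getElem_cons hk, hdot]
      simp [this]

theorem pvCandidates_mem (et c : List Char) :
    c ∈ (PySem.List.enumerate et).foldl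
        (fun acc p =>
          if p.2 == '.' then acc ++ [PySem.List.slice et none (some p.1) ++ ['.', '*']] else acc)
        [et] ↔
      (c = et ∨ ∃ (k : Nat) (_ : k < et.length), et[k] = '.' ∧ c = et.take k ++ ['.', '*']) := by
  rw [PySem.List.foldl_append_if]
  simp only [List.mem_append, List.mem_map, List.mem_filter, List.mem_singleton]
  constructor
  · rintro (rfl | ⟨p, ⟨hp, hdot⟩, rfl⟩)
    · exact Or.inl rfl
    · right
      rw [PySem.List.mem_enumerate_iff] at hp
      obtain ⟨k, hk, rfl⟩ := hp
      simp only [beq_iff_eq] at hdot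
      refine ⟨k, hk, hdot, ?_⟩
      have : ((0 : Int) + k) = (k : Int) := by omega
      rw [this, PySem.List.slice_to_natCast]
  · rintro (rfl | ⟨k, hk, hdot, rfl⟩)
    · exact Or.inl rfl
    · right
      refine ⟨((0 : Int) + k, et[k]), ⟨?_, by simp [hdot]⟩, ?_⟩
      · rw [PySem.List.mem_enumerate_iff]; exact ⟨k, hk, rfl⟩
      · have : ((0 : Int) + k) = (k : Int) := by omega
        rw [this, PySem.List.slice_to_natCast]

-- ===== VERDICT (by name: the statement is the Claim_ definition above) =====
theorem matches_event_filter_py_spec : Claim_equal_matches_event_filter_py := by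
  intro event_type filter_str _
  unfold Spec_matches_event_filter_py matches_event_filter_py matches_event_filter_py_alt
  split_ifs with h
  · rfl
  · rw [pvLoopA_eq_any, Bool.eq_iff_iff]
    simp only [List.any_eq_true, pvPredA_iff, pvCandidates_mem,
      PySem.Set.contains_eq_listContains, List.contains_eq_mem, decide_eq_true_eq,
      PySem.Set.mem_ofList]
    constructor
    · rintro ⟨x, hmem, hP⟩; exact ⟨x, hP, hmem⟩
    · rintro ⟨x, hP, hmem⟩; exact ⟨x, hmem, hP⟩
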